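-- pv_equiv track=rewrite | github.com/igorvanloo/Project-Euler-Explained | Finished Problems/pe00189 - Tri-colouring a triangular grid.py | gen_string
-- ===== SOURCE A (Python) =====
-- def gen_string(mask, pos, prev):
--     strings = []
--
--     if pos == len(mask) + 2:
--         return [prev]
--
--     if pos == 0:
--         for x in ("R", "G", "B"):
--             strings += gen_string(mask, pos + 1, prev + x)
--     else:
--         if pos % 2 == 1:
--             for x in ("R", "G", "B"):
--                 if x != mask[pos - 1] and x != prev[-1]:
--                     strings += gen_string(mask, pos + 1, prev + x)
--         else:
--             for x in ("R", "G", "B"):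
--                 if x != prev[-1]:
--                     strings += gen_string(mask, pos + 1, prev + x)
--     return strings
-- ===== SOURCE B (Python) =====
-- def gen_string(mask, pos, prev):
--     partials = [prev]
--     for p in range(pos, len(mask) + 2):
--         if p == 0:
--             partials = [s + x for s in partials for x in "RGB"]
--         elif p % 2 == 1:
--             m = mask[p - 1]
--             partials = [s + x for s in partials for x in "RGB" if x != m and x != s[-1]]
--         else:
--             partials = [s + x for s in partials for x in "RGB" if x != s[-1]]
--     return partials
-- ===== Notes on version B (the rewrite author's own statement) =====
-- stated objective: simpler
-- what changed: Replaced A's depth-first recursion (each recursive call explores one extension subtree and concatenates results) by an iterative breadth-first loop that grows one flat list of partial strings position by position; the layer-by-layer product yields the same lexicographic order.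
import Mathlib
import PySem

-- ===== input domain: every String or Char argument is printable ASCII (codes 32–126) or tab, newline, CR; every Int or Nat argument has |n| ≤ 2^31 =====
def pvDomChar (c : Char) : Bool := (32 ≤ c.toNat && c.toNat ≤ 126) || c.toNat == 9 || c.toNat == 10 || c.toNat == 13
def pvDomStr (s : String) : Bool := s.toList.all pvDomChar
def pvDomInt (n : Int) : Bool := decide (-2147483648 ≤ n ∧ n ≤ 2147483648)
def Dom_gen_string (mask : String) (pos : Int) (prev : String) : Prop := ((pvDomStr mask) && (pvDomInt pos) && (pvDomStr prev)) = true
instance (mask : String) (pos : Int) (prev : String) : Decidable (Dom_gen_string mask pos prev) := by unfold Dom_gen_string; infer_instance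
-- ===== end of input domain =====

-- B replaces A's depth-first recursion by an iterative layer-by-layer construction (objective: simpler).

-- ===== PORT A =====
-- A's recursion on pos terminates (inside Pre_) when pos reaches len(mask)+2; the fuel
-- ((len+2-pos).toNat + 1) counts exactly the remaining recursion depth, so inside Pre_
-- the fuel is never exhausted and the port is A's recursion step for step.
def genA (mask : List Char) (pos : Int) (prev : List Char) : Nat → List String
  | 0 => []
  | Nat.succ n =>
    if pos = (mask.length : Int) + 2 then [String.ofList prev]
    else if pos = 0 then
      ['R', 'G', 'B'].foldl (fun acc x => acc ++ genA mask (pos + 1) (prev ++ [x]) n) []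
    else if PySem.Int.mod pos 2 = 1 then
      ['R', 'G', 'B'].foldl (fun acc x =>
        if (some x != PySem.List.pyGet? mask (pos - 1)) && (some x != PySem.List.pyGet? prev (-1)) then
          acc ++ genA mask (pos + 1) (prev ++ [x]) n
        else acc) []
    else
      ['R', 'G', 'B'].foldl (fun acc x =>
        if (some x != PySem.List.pyGet? prev (-1)) then
          acc ++ genA mask (pos + 1) (prev ++ [x]) n
        else acc) []

def gen_string (mask : String) (pos : Int) (prev : String) : List String :=
  genA mask.toList pos prev.toList (((mask.toList.length : Int) + 2 - pos).toNat + 1)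

-- ===== PORT B =====
-- one loop iteration of Source B: extend every partial string by each allowed colour at position p
def stepB (mask : List Char) (partials : List (List Char)) (p : Int) : List (List Char) :=
  if p = 0 then
    partials.flatMap (fun s => ['R', 'G', 'B'].map (fun x => s ++ [x]))
  else if PySem.Int.mod p 2 = 1 then
    partials.flatMap (fun s =>
      (['R', 'G', 'B'].filter (fun x =>
        (some x != PySem.List.pyGet? mask (p - 1)) && (some x != PySem.List.pyGet? s (-1)))).map
        (fun x => s ++ [x]))
  else
    partials.flatMap (fun s =>
      (['R', 'G', 'B'].filter (fun x => (some x != PySem.List.pyGet? s (-1)))).map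
        (fun x => s ++ [x]))

def gen_string_alt (mask : String) (pos : Int) (prev : String) : List String :=
  ((PySem.List.pyRange pos ((mask.toList.length : Int) + 2) 1).foldl (stepB mask.toList)
      [prev.toList]).map String.ofList

-- ===== PRECONDITION & SPEC =====
-- Pre_ is exactly the set of inputs on which the Python A returns: pos = len(mask)+2 (immediate
-- base case), or pos within [1-len(mask), len(mask)+1] with len(mask) odd (otherwise some odd
-- position indexes mask out of range: IndexError) and prev nonempty when pos ≠ 0 (else prev[-1]
-- raises IndexError); for pos > len(mask)+2 A also raises (see Raises_ below).
def Pre_gen_string (mask : String) (pos : Int) (prev : String) : Prop :=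
  pos = (mask.toList.length : Int) + 2 ∨
    (1 - (mask.toList.length : Int) ≤ pos ∧ pos ≤ (mask.toList.length : Int) + 1 ∧
      (pos ≠ 0 → prev.toList ≠ []) ∧ mask.toList.length % 2 = 1)
instance (mask : String) (pos : Int) (prev : String) : Decidable (Pre_gen_string mask pos prev) := by
  unfold Pre_gen_string; infer_instance

def pvWitness_gen_string : String × Int × String := ("R", 0, "")

def Spec_gen_string (mask : String) (pos : Int) (prev : String) (out : List String) : Prop :=
  out = gen_string_alt mask pos prev
instance (mask : String) (pos : Int) (prev : String) (out : List String) :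
    Decidable (Spec_gen_string mask pos prev out) := by unfold Spec_gen_string; infer_instance

-- ===== CLAIM (what is proved, stated in full; the proofs are below) =====
def Claim_equal_gen_string : Prop := ∀ (mask : String) (pos : Int) (prev : String),
  Dom_gen_string mask pos prev → Pre_gen_string mask pos prev →
    Spec_gen_string mask pos prev (gen_string mask pos prev)

-- ===== LEMMAS AND PROOFS =====

-- a flatMap of guarded lists is a flatMap over the filtered list
theorem flatMap_if_eq_filter_flatMap {α β : Type} (l : List α) (p : α → Bool) (f : α → List β) :
    (l.flatMap fun x => if p x then f x else []) = (l.filter p).flatMap f := by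
  induction l with
  | nil => simp
  | cons a l ih => by_cases h : p a <;> simp [h, ih]

-- 'strings += f(x)' over a list is a flatMap
theorem foldl_append_eq_flatMap' {α β : Type} (l : List α) (f : α → List β) (acc : List β) :
    l.foldl (fun acc x => acc ++ f x) acc = acc ++ l.flatMap f := by
  induction l generalizing acc with
  | nil => simp
  | cons a l ih => simp [ih, List.append_assoc]

-- guarded accumulator append: pull the guard inside the appended list
theorem foldl_append_if_eq_flatMap {α β : Type} (l : List α) (p : α → Bool) (f : α → List β) :
    l.foldl (fun acc x => if p x then acc ++ f x else acc) [] = (l.filter p).flatMap f := by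
  have h : (fun (acc : List β) x => if p x then acc ++ f x else acc)
      = fun acc x => acc ++ (if p x then f x else []) := by
    funext acc x; by_cases hx : p x <;> simp [hx]
  rw [h, foldl_append_eq_flatMap', flatMap_if_eq_filter_flatMap]
  simp

-- one-step unfolding of A's recursion (rw-friendly: does not unfold the recursive calls)
theorem genA_succ (mask : List Char) (pos : Int) (prev : List Char) (n : Nat) :
    genA mask pos prev (n + 1)
      = if pos = (mask.length : Int) + 2 then [String.ofList prev]
        else if pos = 0 then
          ['R', 'G', 'B'].foldl (fun acc x => acc ++ genA mask (pos + 1) (prev ++ [x]) n) []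
        else if PySem.Int.mod pos 2 = 1 then
          ['R', 'G', 'B'].foldl (fun acc x =>
            if (some x != PySem.List.pyGet? mask (pos - 1)) && (some x != PySem.List.pyGet? prev (-1)) then
              acc ++ genA mask (pos + 1) (prev ++ [x]) n
            else acc) []
        else
          ['R', 'G', 'B'].foldl (fun acc x =>
            if (some x != PySem.List.pyGet? prev (-1)) then
              acc ++ genA mask (pos + 1) (prev ++ [x]) n
            else acc) [] := rfl

-- one step of B on a list of partials is the flatMap of the step on singletons
theorem stepB_flatMap (mask : List Char) (partials : List (List Char)) (p : Int) :
    stepB mask partials p = partials.flatMap (fun s => stepB mask [s] p) := by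
  unfold stepB; split_ifs <;> simp

-- B's whole loop distributes over the list of partials
theorem foldl_stepB_flatMap (mask : List Char) (ps : List Int) :
    ∀ partials : List (List Char),
      ps.foldl (stepB mask) partials
        = partials.flatMap (fun s => ps.foldl (stepB mask) [s]) := by
  induction ps with
  | nil => intro partials; simp
  | cons p ps ih =>
    intro partials
    simp only [List.foldl_cons]
    rw [ih, stepB_flatMap, List.flatMap_assoc]
    congr 1; funext s
    rw [ih (stepB mask [s] p)]

-- the core correspondence: A's recursion from pos with exact fuel d+1 equals B's loop from pos
theorem key (mask : List Char) : ∀ (d : Nat) (pos : Int) (prev : List Char),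
    pos + (d : Int) = (mask.length : Int) + 2 →
    genA mask pos prev (d + 1)
      = ((PySem.List.pyRange pos ((mask.length : Int) + 2) 1).foldl (stepB mask)
          [prev]).map String.ofList := by
  intro d
  induction d with
  | zero =>
    intro pos prev h
    simp only [Int.natCast_zero, add_zero] at h
    rw [PySem.List.pyRange_one_eq_nil (le_of_eq h.symm)]
    simp [genA, h]
  | succ d ih =>
    intro pos prev h
    have hlt : pos < (mask.length : Int) + 2 := by push_cast at h ⊢; omega
    have hne : pos ≠ (mask.length : Int) + 2 := ne_of_lt hlt
    have hrec : ∀ x : Char, genA mask (pos + 1) (prev ++ [x]) (d + 1)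
        = ((PySem.List.pyRange (pos + 1) ((mask.length : Int) + 2) 1).foldl (stepB mask)
            [prev ++ [x]]).map String.ofList := by
      intro x; apply ih; push_cast at h ⊢; omega
    rw [PySem.List.pyRange_one_cons hlt]
    simp only [List.foldl_cons]
    rw [foldl_stepB_flatMap]
    rw [show d + 1 + 1 = d + 1 + 1 from rfl, genA_succ, if_neg hne]
    by_cases h0 : pos = 0
    · subst h0
      rw [if_pos rfl, foldl_append_eq_flatMap']
      simp only [stepB, List.flatMap_singleton, List.map_flatMap, List.nil_append]
      exact List.flatMap_congr (fun x _ => hrec x)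
    · rw [if_neg h0]
      by_cases hodd : PySem.Int.mod pos 2 = 1
      · rw [if_pos hodd, foldl_append_if_eq_flatMap]
        simp only [stepB, h0, if_false, hodd, if_true, List.flatMap_singleton,
          List.map_flatMap, List.flatMap_map]
        exact List.flatMap_congr (fun x _ => hrec x)
      · rw [if_neg hodd, foldl_append_if_eq_flatMap]
        simp only [stepB, h0, if_false, hodd, List.flatMap_singleton,
          List.map_flatMap, List.flatMap_map]
        exact List.flatMap_congr (fun x _ => hrec x)

-- ===== VERDICT (by name: the statement is the Claim_ definition above) =====
theorem gen_string_spec : Claim_equal_gen_string := by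
  intro mask pos prev _ hpre
  unfold Spec_gen_string gen_string gen_string_alt
  have hle : pos ≤ (mask.toList.length : Int) + 2 := by
    rcases hpre with h | ⟨_, h, _, _⟩ <;> omega
  have hfuel : (((mask.toList.length : Int) + 2 - pos).toNat : Int)
      + pos = (mask.toList.length : Int) + 2 := by omega
  have := key mask.toList (((mask.toList.length : Int) + 2 - pos).toNat) pos prev.toList
    (by omega)
  exact this
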